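-- pv_equiv track=rewrite | github.com/HubTou/vuxml | src/vuxml/library.py | get_vulns_by_discovery_dates
-- ===== SOURCE A (Python) =====
-- def get_vulns_by_discovery_dates(vuxml):
--     """ Return a dictionary of VID by discovery dates from a VuXML data structure """
--     if not vuxml:
--         return {}
--
--     discovery_dates = {}
--     for vuln_vid, vuln_data in vuxml.items():
--         if 'discovery' in vuln_data['dates']:
--             if vuln_data['dates']['discovery'] in discovery_dates:
--                 discovery_dates[vuln_data['dates']['discovery']].append(vuln_vid)
--             else:
--                 discovery_dates[vuln_data['dates']['discovery']] = [vuln_vid]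
--
--     return discovery_dates
-- ===== SOURCE B (Python) =====
-- def get_vulns_by_discovery_dates(vuxml):
--     """ Return a dictionary of VID by discovery dates from a VuXML data structure """
--     if not vuxml:
--         return {}
--
--     pairs = [(vid, data['dates']['discovery'])
--              for vid, data in vuxml.items()
--              if 'discovery' in data['dates']]
--     return {date: [vid for vid, d in pairs if d == date]
--             for date in dict.fromkeys(d for _, d in pairs)}
-- ===== Notes on version B (the rewrite author's own statement) =====
-- stated objective: alternative
-- what changed: Replaces the incremental build-a-dict-entry-by-entry loop (membership test, then append or create) with a flatten-then-group decomposition: first extract the flat (vid, discovery-date) pair list, then build the result in one dict comprehension over the deduplicated dates, collecting each date's vids by a scan of the pair list.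
import Mathlib
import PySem

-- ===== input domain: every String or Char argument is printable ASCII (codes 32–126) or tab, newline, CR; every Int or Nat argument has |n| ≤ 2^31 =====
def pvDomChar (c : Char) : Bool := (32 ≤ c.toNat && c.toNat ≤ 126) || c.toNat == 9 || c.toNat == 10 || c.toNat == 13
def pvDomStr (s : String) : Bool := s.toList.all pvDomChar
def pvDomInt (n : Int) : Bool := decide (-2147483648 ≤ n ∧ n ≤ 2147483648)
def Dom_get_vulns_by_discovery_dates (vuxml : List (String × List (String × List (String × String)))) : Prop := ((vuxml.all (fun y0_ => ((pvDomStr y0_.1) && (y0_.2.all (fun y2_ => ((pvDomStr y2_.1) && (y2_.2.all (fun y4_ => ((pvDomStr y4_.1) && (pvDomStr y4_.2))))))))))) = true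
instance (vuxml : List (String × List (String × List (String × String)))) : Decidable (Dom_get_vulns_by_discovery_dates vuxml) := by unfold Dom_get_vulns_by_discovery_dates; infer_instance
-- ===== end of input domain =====

-- B replaces A's incremental dict-building loop by a flatten-to-pairs step followed by a
-- grouping comprehension over the deduplicated dates (objective: alternative decomposition).

-- ===== PORT A =====
def get_vulns_by_discovery_dates (vuxml : List (String × List (String × List (String × String)))) : List (String × List String) :=
  if vuxml = [] then []
  else
    (vuxml.foldl (fun acc p =>
      let dates : PySem.Dict String String :=
        PySem.Dict.mk ((PySem.Dict.mk p.2).getD "dates" [])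
      if dates.contains "discovery" then
        if acc.contains (dates.getD "discovery" "") then
          acc.modify (dates.getD "discovery" "") [] (fun l => l ++ [p.1])
        else
          acc.insert (dates.getD "discovery" "") [p.1]
      else acc) PySem.Dict.empty).items

-- ===== PORT B =====
def get_vulns_by_discovery_dates_alt (vuxml : List (String × List (String × List (String × String)))) : List (String × List String) :=
  if vuxml = [] then []
  else
    let pairs := vuxml.filterMap (fun p =>
      let dates : PySem.Dict String String :=
        PySem.Dict.mk ((PySem.Dict.mk p.2).getD "dates" [])
      if dates.contains "discovery" then some (p.1, dates.getD "discovery" "") else none)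
    (PySem.List.dedup (pairs.map (fun q => q.2))).map
      (fun date => (date, (pairs.filter (fun q => q.2 == date)).map (fun q => q.1)))

-- ===== PRECONDITION & SPEC =====
-- Pre_ excludes exactly the inputs where some vuln has no 'dates' key, on which A raises KeyError.
def Pre_get_vulns_by_discovery_dates (vuxml : List (String × List (String × List (String × String)))) : Prop :=
  ∀ p ∈ vuxml, ((PySem.Dict.mk p.2).get? "dates").isSome
instance (vuxml : List (String × List (String × List (String × String)))) : Decidable (Pre_get_vulns_by_discovery_dates vuxml) := by unfold Pre_get_vulns_by_discovery_dates; infer_instance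

def pvWitness_get_vulns_by_discovery_dates : (List (String × List (String × List (String × String)))) :=
  [("vid1", [("dates", [("discovery", "2020-01-01"), ("entry", "2020-02-01")])]),
   ("vid2", [("dates", [("discovery", "2020-01-01")])]),
   ("vid3", [("dates", [("entry", "2020-03-01")])])]

def Spec_get_vulns_by_discovery_dates (vuxml : List (String × List (String × List (String × String)))) (out : List (String × List String)) : Prop := out = get_vulns_by_discovery_dates_alt vuxml
instance (vuxml : List (String × List (String × List (String × String)))) (out : List (String × List String)) : Decidable (Spec_get_vulns_by_discovery_dates vuxml out) := by unfold Spec_get_vulns_by_discovery_dates; infer_instance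

-- ===== CLAIM (what is proved, stated in full; the proofs are below) =====
def Claim_equal_get_vulns_by_discovery_dates : Prop := ∀ (vuxml : List (String × List (String × List (String × String)))), Dom_get_vulns_by_discovery_dates vuxml → Pre_get_vulns_by_discovery_dates vuxml → Spec_get_vulns_by_discovery_dates vuxml (get_vulns_by_discovery_dates vuxml)

-- ===== LEMMAS AND PROOFS =====

-- the extraction step shared by the reasoning: what B computes per vuln
def pvExtract (p : String × List (String × List (String × String))) : Option (String × String) :=
  let dates : PySem.Dict String String :=
    PySem.Dict.mk ((PySem.Dict.mk p.2).getD "dates" [])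
  if dates.contains "discovery" then some (p.1, dates.getD "discovery" "") else none

-- A's loop body is a single dict 'modify' on the extracted pair (insert-on-absent = modify)
lemma stepA_eq_modify (acc : PySem.Dict String (List String))
    (p : String × List (String × List (String × String))) :
    (let dates : PySem.Dict String String :=
        PySem.Dict.mk ((PySem.Dict.mk p.2).getD "dates" [])
      if dates.contains "discovery" then
        if acc.contains (dates.getD "discovery" "") then
          acc.modify (dates.getD "discovery" "") [] (fun l => l ++ [p.1])
        else
          acc.insert (dates.getD "discovery" "") [p.1]
      else acc)
    = match pvExtract p with
      | some q => acc.modify q.2 [] (fun l => l ++ [q.1])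
      | none => acc := by
  simp only [pvExtract]
  split
  · split
    · rfl
    · next h =>
      simp [PySem.Dict.modify, PySem.Dict.getD_of_not_contains acc ([] : List String) (by simpa using h)]
  · rfl

-- A's whole loop is the modify-loop over the extracted pair list (dates swapped to the key slot)
lemma foldA_eq_foldPairs (vuxml : List (String × List (String × List (String × String))))
    (acc : PySem.Dict String (List String)) :
    vuxml.foldl (fun acc p =>
      let dates : PySem.Dict String String :=
        PySem.Dict.mk ((PySem.Dict.mk p.2).getD "dates" [])
      if dates.contains "discovery" then
        if acc.contains (dates.getD "discovery" "") then
          acc.modify (dates.getD "discovery" "") [] (fun l => l ++ [p.1])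
        else
          acc.insert (dates.getD "discovery" "") [p.1]
      else acc) acc
    = ((vuxml.filterMap pvExtract).map (fun q => (q.2, q.1))).foldl
        (fun d p => d.modify p.1 [] (fun l => l ++ [p.2])) acc := by
  induction vuxml generalizing acc with
  | nil => rfl
  | cons p rest ih =>
    rw [List.foldl_cons, stepA_eq_modify]
    cases hq : pvExtract p with
    | none =>
      simp only [List.filterMap_cons, hq]
      exact ih acc
    | some q =>
      simp only [List.filterMap_cons, hq, List.map_cons, List.foldl_cons]
      exact ih _

lemma filter_swap (pairs : List (String × String)) (k : String) :
    ((pairs.map (fun q => (q.2, q.1))).filter (fun p => p.1 == k)).map (fun x => x.2)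
    = (pairs.filter (fun q => q.2 == k)).map (fun q => q.1) := by
  rw [List.filter_map, List.map_map]
  rfl

-- ===== VERDICT (by name: the statement is the Claim_ definition above) =====
theorem get_vulns_by_discovery_dates_spec : Claim_equal_get_vulns_by_discovery_dates := by
  intro vuxml _ _
  unfold Spec_get_vulns_by_discovery_dates get_vulns_by_discovery_dates get_vulns_by_discovery_dates_alt
  by_cases hne : vuxml = []
  · simp [hne]
  · simp only [hne, ite_false]
    rw [foldA_eq_foldPairs]
    set pairs := vuxml.filterMap pvExtract with hpairs
    have hnodup : (((pairs.map (fun q => (q.2, q.1))).foldl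
        (fun d p => d.modify p.1 [] (fun l => l ++ [p.2])) PySem.Dict.empty)).keys.Nodup := by
      exact PySem.Dict.nodup_keys_foldl_modify_key _ Prod.fst [] (fun d x => fun l => l ++ [x.2]) _
        (by simp [PySem.Dict.keys_empty])
    rw [PySem.Dict.items_eq_map_keys _ hnodup []]
    rw [PySem.Dict.keys_foldl_modify_key _ Prod.fst [] (fun d x => fun l => l ++ [x.2])]
    have hkeys : PySem.Set.update (PySem.Dict.empty (κ := String) (ν := List String)).keys
        ((pairs.map (fun q => (q.2, q.1))).map Prod.fst)
        = PySem.List.dedup (pairs.map (fun q => q.2)) := by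
      rw [PySem.Dict.keys_empty, PySem.Set.update_nil_left, List.map_map]
      rfl
    rw [hkeys]
    apply List.map_congr_left
    intro k _
    rw [PySem.Dict.getD_foldl_modify_append, filter_swap]
    simp only [PySem.Dict.getD_empty, List.nil_append]
    rfl
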